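-- pv_equiv track=rewrite | github.com/kkestell/books | src/books/models.py | sanitizeForPath
-- ===== SOURCE A (Python) =====
-- def sanitizeForPath(name: str) -> str:
--     """
--     Sanitize a string to make it safe for use in a file path.
--
--     :param name: The string to sanitize.
--     :type name: str
--     :return: The sanitized string.
--     :rtype: Optional[str]
--     """
--     invalidChars = ['<', '>', ':', '"', '/', '\\', '|', '?', '*']
--     sanitized = name
--     for invalidChar in invalidChars:
--         sanitized = sanitized.replace(invalidChar, '')
--
--     if len(sanitized) > 64:
--         sanitized = sanitized[:64]
--
--     sanitized = sanitized.strip('.')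
--     sanitized = sanitized.strip()
--
--     return sanitized
-- ===== SOURCE B (Python) =====
-- def sanitizeForPath(name: str) -> str:
--     """Sanitize a string for file-path use: single membership-filtered pass instead of nine replace scans."""
--     invalid = frozenset('<>:"/\\|?*')
--     sanitized = ''.join(c for c in name if c not in invalid)
--     if len(sanitized) > 64:
--         sanitized = sanitized[:64]
--     return sanitized.strip('.').strip()
-- ===== Notes on version B (the rewrite author's own statement) =====
-- stated objective: idiomatic
-- what changed: Replaces nine sequential str.replace scans with a single pass that filters characters through a frozenset of the invalid characters; truncate/strip tail unchanged.
import Mathlib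
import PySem

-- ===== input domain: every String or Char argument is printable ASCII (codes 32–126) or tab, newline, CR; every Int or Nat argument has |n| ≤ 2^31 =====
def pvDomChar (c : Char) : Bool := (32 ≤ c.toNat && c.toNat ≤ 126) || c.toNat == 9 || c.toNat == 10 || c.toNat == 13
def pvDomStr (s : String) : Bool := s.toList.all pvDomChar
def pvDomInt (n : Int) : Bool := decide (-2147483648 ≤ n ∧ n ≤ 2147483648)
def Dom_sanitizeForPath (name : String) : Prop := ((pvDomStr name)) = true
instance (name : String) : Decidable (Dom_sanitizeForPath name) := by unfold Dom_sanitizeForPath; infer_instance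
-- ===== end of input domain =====

-- B replaces A's nine sequential str.replace scans with one membership-filtered pass (idiomatic; same tail).


-- ===== PORT A =====
def sanitizeForPath (name : String) : String :=
  let invalidChars : List String := ["<", ">", ":", "\"", "/", "\\", "|", "?", "*"]
  let sanitized := invalidChars.foldl (fun s c => PySem.Str.replace s c "") name
  let sanitized := if PySem.Str.len sanitized > 64 then PySem.Str.slice sanitized none (some 64) else sanitized
  let sanitized := PySem.Str.stripChars sanitized "."
  PySem.Str.strip sanitized

-- ===== PORT B =====
def sanitizeForPath_alt (name : String) : String :=
  let invalid : PySem.Set Char := PySem.Set.ofList "<>:\"/\\|?*".toList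
  let sanitized := String.ofList (name.toList.filter (fun c => !(invalid.contains c)))
  let sanitized := if PySem.Str.len sanitized > 64 then PySem.Str.slice sanitized none (some 64) else sanitized
  PySem.Str.strip (PySem.Str.stripChars sanitized ".")

-- ===== PRECONDITION & SPEC =====
def Spec_sanitizeForPath (name : String) (out : String) : Prop := out = sanitizeForPath_alt name
instance (name : String) (out : String) : Decidable (Spec_sanitizeForPath name out) := by unfold Spec_sanitizeForPath; infer_instance

-- ===== CLAIM (what is proved, stated in full; the proofs are below) =====
def Claim_equal_sanitizeForPath : Prop := ∀ (name : String), Dom_sanitizeForPath name → Spec_sanitizeForPath name (sanitizeForPath name)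

-- ===== LEMMAS AND PROOFS =====

-- replace.go with a single-character pattern and empty replacement is filtering that character out
lemma replace_go_single (b : Char) (l acc : List Char) (fuel : Nat) (h : l.length ≤ fuel) :
    PySem.Chars.replace.go [b] [] fuel l acc = acc.reverse ++ l.filter (fun c => !(c == b)) := by
  induction fuel generalizing l acc with
  | zero =>
    have : l = [] := List.length_eq_zero_iff.mp (Nat.le_zero.mp h)
    subst this
    simp [PySem.Chars.replace.go]
  | succ n ih =>
    cases l with
    | nil => simp [PySem.Chars.replace.go]
    | cons c t =>
      simp only [PySem.Chars.replace.go]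
      by_cases hc : c = b
      · subst hc
        have hp : List.isPrefixOf [c] (c :: t) = true := by simp [List.isPrefixOf]
        simp only [hp, List.length_cons, List.drop_succ_cons,
          List.reverse_nil, List.nil_append, List.filter_cons, beq_self_eq_true,
          Bool.not_true, Bool.false_eq_true]
        exact ih t acc (Nat.succ_le_succ_iff.mp h)
      · have hp : List.isPrefixOf [b] (c :: t) = false := by
          simp [List.isPrefixOf]
          exact fun h' => hc h'.symm
        simp only [hp, Bool.false_eq_true, if_neg, not_false_iff]
        rw [ih t (c :: acc) (Nat.succ_le_succ_iff.mp h)]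
        simp [hc]

lemma replace_single (b : Char) (l : List Char) :
    PySem.Chars.replace l [b] [] = l.filter (fun c => !(c == b)) := by
  rw [PySem.Chars.replace]
  simp only [List.isEmpty_cons, Bool.false_eq_true, if_neg, not_false_iff]
  exact replace_go_single b l [] l.length (le_refl _)

-- a left fold of single-character removals is one filter against the character list
lemma foldl_replace_eq_filter (chars : List Char) (l : List Char) :
    chars.foldl (fun s c => PySem.Chars.replace s [c] []) l
      = l.filter (fun x => !(chars.contains x)) := by
  induction chars generalizing l with
  | nil => simp
  | cons c cs ih =>
    simp only [List.foldl_cons]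
    rw [replace_single, ih, List.filter_filter]
    congr 1
    funext x
    cases hx : (x == c) <;> cases hy : (c == x) <;>
      simp_all [Bool.and_comm, beq_iff_eq]

-- the String-level fold of replaces computes the char-level fold
lemma str_foldl_toList (chars : List String) (name : String) :
    (chars.foldl (fun s c => PySem.Str.replace s c "") name).toList
      = chars.foldl (fun l c => PySem.Chars.replace l c.toList []) name.toList := by
  induction chars generalizing name with
  | nil => rfl
  | cons c cs ih =>
    simp only [List.foldl_cons]
    rw [ih]
    congr 1
    simp [PySem.Str.toList_replace]

-- the two pre-truncation strings coincide
lemma clean_eq (name : String) :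
    (["<", ">", ":", "\"", "/", "\\", "|", "?", "*"] : List String).foldl
        (fun s c => PySem.Str.replace s c "") name
      = String.ofList (name.toList.filter
          (fun c => !((PySem.Set.ofList "<>:\"/\\|?*".toList).contains c))) := by
  apply String.ext
  have hset : (PySem.Set.ofList "<>:\"/\\|?*".toList) = "<>:\"/\\|?*".toList := by decide
  rw [hset, str_foldl_toList]
  have h0 : "<>:\"/\\|?*".toList = ['<','>',':','"','/','\\','|','?','*'] := by decide
  have h1 : "<".toList = ['<'] := by decide
  have h2 : ">".toList = ['>'] := by decide
  have h3 : ":".toList = [':'] := by decide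
  have h4 : "\"".toList = ['"'] := by decide
  have h5 : "/".toList = ['/'] := by decide
  have h6 : "\\".toList = ['\\'] := by decide
  have h7 : "|".toList = ['|'] := by decide
  have h8 : "?".toList = ['?'] := by decide
  have h9 : "*".toList = ['*'] := by decide
  have hstep :
      (["<", ">", ":", "\"", "/", "\\", "|", "?", "*"] : List String).foldl
          (fun l c => PySem.Chars.replace l c.toList []) name.toList
        = ("<>:\"/\\|?*".toList).foldl (fun l b => PySem.Chars.replace l [b] []) name.toList := by
    simp only [h0, h1, h2, h3, h4, h5, h6, h7, h8, h9, List.foldl_cons, List.foldl_nil]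
  rw [hstep, foldl_replace_eq_filter, h0, String.toList_ofList]
  simp [PySem.Set.contains]

-- ===== VERDICT (by name: the statement is the Claim_ definition above) =====
theorem sanitizeForPath_spec : Claim_equal_sanitizeForPath := by
  intro name _
  unfold Spec_sanitizeForPath sanitizeForPath sanitizeForPath_alt
  dsimp only
  rw [clean_eq]
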